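-- pv_equiv track=rewrite | github.com/juaquicar/GeoAgents | agents_gis/inspect.py | _infer_id_col
-- ===== SOURCE A (Python) =====
-- def _infer_id_col(columns: list) -> str:
--     for col in columns:
--         if col["name"] in ("id", "gid", "ogc_fid", "objectid", "fid"):
--             return col["name"]
--     for col in columns:
--         if col["data_type"] in ("integer", "bigint", "smallint", "serial", "bigserial"):
--             return col["name"]
--     return "id"
-- ===== SOURCE B (Python) =====
-- def _infer_id_col(columns: list) -> str:
--     fallback = None
--     for col in columns:
--         name = col["name"]
--         if name in ("id", "gid", "ogc_fid", "objectid", "fid"):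
--             return name
--         if fallback is None and col.get("data_type") in ("integer", "bigint", "smallint", "serial", "bigserial"):
--             fallback = name
--     return fallback if fallback is not None else "id"
-- ===== Notes on version B (the rewrite author's own statement) =====
-- stated objective: alternative
-- what changed: Replaces A's two sequential scans (name pass, then integer-type pass) by a single loop that returns on a name match and records the first integer-typed column's name as a fallback applied only after the loop.
import Mathlib
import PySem

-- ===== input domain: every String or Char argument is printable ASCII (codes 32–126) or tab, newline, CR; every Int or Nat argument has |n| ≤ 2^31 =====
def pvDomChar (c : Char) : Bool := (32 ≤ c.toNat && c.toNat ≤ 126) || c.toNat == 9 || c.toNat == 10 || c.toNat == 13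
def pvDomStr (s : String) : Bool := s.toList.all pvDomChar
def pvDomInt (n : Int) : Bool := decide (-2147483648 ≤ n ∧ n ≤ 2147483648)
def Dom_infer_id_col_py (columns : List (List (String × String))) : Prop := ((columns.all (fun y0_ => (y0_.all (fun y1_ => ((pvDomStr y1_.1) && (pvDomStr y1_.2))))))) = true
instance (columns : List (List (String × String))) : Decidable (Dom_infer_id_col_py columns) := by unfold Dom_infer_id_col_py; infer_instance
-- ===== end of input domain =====

-- B replaces A's two sequential scans by one loop with an integer-typed fallback recorded on the fly (alternative decomposition, same cost).


-- shared literal tuples from the Python source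
def pvNames : List String := ["id", "gid", "ogc_fid", "objectid", "fid"]
def pvTypes : List String := ["integer", "bigint", "smallint", "serial", "bigserial"]

-- col["name"] / col.get("data_type"): a column is a dict rendered as an association list
def pvGet (col : List (String × String)) (k : String) : Option String :=
  (PySem.Dict.mk col).get? k

-- col["name"] in ("id", …) — false also when "name" is absent (helper shared by Pre_ and the B port)
def pvNameMatch (col : List (String × String)) : Bool :=
  match pvGet col "name" with
  | some n => decide (n ∈ pvNames)
  | none => false

-- col.get("data_type") in ("integer", …)
def pvIsIntCol (col : List (String × String)) : Bool :=
  match pvGet col "data_type" with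
  | some d => decide (d ∈ pvTypes)
  | none => false

-- ===== PORT A =====
-- first loop: return col["name"] on a preferred-name match; none = fell through (or KeyError, excluded by Pre_)
def aLoop1 : List (List (String × String)) → Option String
  | [] => none
  | col :: rest =>
    match pvGet col "name" with
    | none => none            -- KeyError col["name"]; excluded by Pre_
    | some n => if n ∈ pvNames then some n else aLoop1 rest

-- second loop: return col["name"] of the first integer-typed column
def aLoop2 : List (List (String × String)) → Option String
  | [] => none
  | col :: rest =>
    match pvGet col "data_type" with
    | none => none            -- KeyError col["data_type"]; excluded by Pre_
    | some d =>
      if d ∈ pvTypes then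
        match pvGet col "name" with
        | none => none        -- KeyError col["name"]; excluded by Pre_
        | some n => some n
      else aLoop2 rest

def infer_id_col_py (columns : List (List (String × String))) : String :=
  match aLoop1 columns with
  | some n => n
  | none =>
    match aLoop2 columns with
    | some n => n
    | none => "id"

-- ===== PORT B =====
-- single loop: return on a name match, else record the first integer-typed column's name as fallback
def bLoop : List (List (String × String)) → Option String → String
  | [], fb => fb.getD "id"
  | col :: rest, fb =>
    match pvGet col "name" with
    | none => "id"            -- KeyError col["name"]; excluded by Pre_
    | some n =>
      if n ∈ pvNames then n
      else bLoop rest (if fb.isNone && pvIsIntCol col then some n else fb)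

def infer_id_col_py_alt (columns : List (List (String × String))) : String :=
  bLoop columns none

-- ===== PRECONDITION & SPEC =====
-- Pre_ excludes exactly the inputs where A raises KeyError: a column reached by the first loop
-- without a "name" key, or — when no name matches — a column reached by the second loop without
-- a "data_type" key (i.e. no integer-typed column precedes it).
def Pre_infer_id_col_py (columns : List (List (String × String))) : Prop :=
  (∀ i, i < columns.length → pvGet columns[i]! "name" = none →
      ∃ col' ∈ columns.take i, pvNameMatch col' = true) ∧
  ((∀ col ∈ columns, pvNameMatch col = false) →
    ∀ i, i < columns.length → pvGet columns[i]! "data_type" = none →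
      ∃ col' ∈ columns.take i, pvIsIntCol col' = true)
instance (columns : List (List (String × String))) : Decidable (Pre_infer_id_col_py columns) := by
  unfold Pre_infer_id_col_py; infer_instance

def pvWitness_infer_id_col_py : (List (List (String × String))) :=
  [[("name", "a"), ("data_type", "integer")], [("name", "b"), ("data_type", "text")]]

def Spec_infer_id_col_py (columns : List (List (String × String))) (out : String) : Prop := out = infer_id_col_py_alt columns
instance (columns : List (List (String × String))) (out : String) : Decidable (Spec_infer_id_col_py columns out) := by unfold Spec_infer_id_col_py; infer_instance

-- ===== CLAIM (what is proved, stated in full; the proofs are below) =====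
def Claim_equal_infer_id_col_py : Prop := ∀ (columns : List (List (String × String))), Dom_infer_id_col_py columns → Pre_infer_id_col_py columns → Spec_infer_id_col_py columns (infer_id_col_py columns)

-- ===== LEMMAS AND PROOFS =====

-- the indexed "every bad column has a good one before it" condition survives dropping a non-good head
theorem pvShift {α : Type} [Inhabited α] (p q : α → Prop) (c0 : α) (rest : List α)
    (H : ∀ i, i < (c0 :: rest).length → p ((c0 :: rest)[i]!) → ∃ c ∈ (c0 :: rest).take i, q c)
    (h0 : ¬ q c0) :
    ∀ i, i < rest.length → p (rest[i]!) → ∃ c ∈ rest.take i, q c := by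
  intro i hi hp
  have := H (i + 1) (by simpa using Nat.succ_lt_succ hi) (by simpa using hp)
  rcases this with ⟨c, hc, hq⟩
  simp only [List.take_succ_cons, List.mem_cons] at hc
  rcases hc with rfl | hc
  · exact absurd hq h0
  · exact ⟨c, hc, hq⟩

-- at index 0 the condition forbids the bad case outright
theorem pvHead {α : Type} [Inhabited α] (p q : α → Prop) (c0 : α) (rest : List α)
    (H : ∀ i, i < (c0 :: rest).length → p ((c0 :: rest)[i]!) → ∃ c ∈ (c0 :: rest).take i, q c) :
    ¬ p c0 := by
  intro hp
  rcases H 0 (by simp) (by simpa using hp) with ⟨c, hc, _⟩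
  simp at hc

-- if the first loop matched, B's loop returns the same name, whatever the fallback is
theorem pvL1 : ∀ (cols : List (List (String × String))) (fb : Option String) (n : String),
    aLoop1 cols = some n → bLoop cols fb = n := by
  intro cols
  induction cols with
  | nil => intro fb n h; simp [aLoop1] at h
  | cons col rest ih =>
    intro fb n h
    simp only [aLoop1, bLoop] at *
    cases hg : pvGet col "name" with
    | none => rw [hg] at h; simp at h
    | some n0 =>
      rw [hg] at h
      by_cases hm : n0 ∈ pvNames
      · simp [hm] at h ⊢; exact h
      · simp [hm] at h ⊢; exact ih _ n h

-- from the first clause of Pre_ and a fruitless first loop: every column has a name and none matches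
theorem pvL0 : ∀ (cols : List (List (String × String))),
    aLoop1 cols = none →
    (∀ i, i < cols.length → pvGet cols[i]! "name" = none →
        ∃ c ∈ cols.take i, pvNameMatch c = true) →
    (∀ col ∈ cols, (pvGet col "name").isSome = true ∧ pvNameMatch col = false) := by
  intro cols
  induction cols with
  | nil => intro _ _ col hc; simp at hc
  | cons col0 rest ih =>
    intro h1 H col hc
    have hname : ¬ pvGet col0 "name" = none :=
      pvHead (fun c => pvGet c "name" = none) (fun c => pvNameMatch c = true) col0 rest H
    cases hg : pvGet col0 "name" with
    | none => exact absurd hg hname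
    | some n0 =>
      simp only [aLoop1, hg] at h1
      by_cases hm : n0 ∈ pvNames
      · simp [hm] at h1
      · simp only [hm, if_false] at h1
        have h0false : pvNameMatch col0 = false := by
          simp [pvNameMatch, hg, hm]
        have Hrest := pvShift (fun c => pvGet c "name" = none)
          (fun c => pvNameMatch c = true) col0 rest H (by simp [h0false])
        rcases List.mem_cons.mp hc with rfl | hc'
        · exact ⟨by simp [hg], h0false⟩
        · exact ih h1 Hrest col hc'

-- with no name match anywhere, a pending fallback is what B returns
theorem pvL2a : ∀ (cols : List (List (String × String))) (f : String),
    (∀ col ∈ cols, (pvGet col "name").isSome = true ∧ pvNameMatch col = false) →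
    bLoop cols (some f) = f := by
  intro cols
  induction cols with
  | nil => intro f _; simp [bLoop]
  | cons col0 rest ih =>
    intro f H
    obtain ⟨hs, hm⟩ := H col0 (by simp)
    cases hg : pvGet col0 "name" with
    | none => rw [hg] at hs; simp at hs
    | some n0 =>
      have hnm : ¬ n0 ∈ pvNames := by
        simp [pvNameMatch, hg] at hm; exact hm
      simp only [bLoop, hg, hnm, if_false]
      simpa using ih f (fun c hc => H c (by simp [hc]))

-- with no name match and the data clause of Pre_: B's loop from an empty fallback equals A's second loop
theorem pvL2b : ∀ (cols : List (List (String × String))),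
    (∀ col ∈ cols, (pvGet col "name").isSome = true ∧ pvNameMatch col = false) →
    (∀ i, i < cols.length → pvGet cols[i]! "data_type" = none →
        ∃ c ∈ cols.take i, pvIsIntCol c = true) →
    bLoop cols none = (match aLoop2 cols with | some m => m | none => "id") := by
  intro cols
  induction cols with
  | nil => intro _ _; simp [bLoop, aLoop2]
  | cons col0 rest ih =>
    intro H Hd
    obtain ⟨hs, hm⟩ := H col0 (by simp)
    cases hg : pvGet col0 "name" with
    | none => rw [hg] at hs; simp at hs
    | some n0 =>
      have hnm : ¬ n0 ∈ pvNames := by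
        simp [pvNameMatch, hg] at hm; exact hm
      have hdt : ¬ pvGet col0 "data_type" = none :=
        pvHead (fun c => pvGet c "data_type" = none) (fun c => pvIsIntCol c = true) col0 rest Hd
      cases hd : pvGet col0 "data_type" with
      | none => exact absurd hd hdt
      | some d0 =>
        by_cases ht : d0 ∈ pvTypes
        · have hint : pvIsIntCol col0 = true := by simp [pvIsIntCol, hd, ht]
          simp only [bLoop, aLoop2, hg, hd, hnm, if_false, ht, if_true, hint,
            Option.isNone_none, Bool.true_and]
          exact pvL2a rest n0 (fun c hc => H c (by simp [hc]))
        · have hint : pvIsIntCol col0 = false := by simp [pvIsIntCol, hd, ht]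
          have Hdrest := pvShift (fun c => pvGet c "data_type" = none)
            (fun c => pvIsIntCol c = true) col0 rest Hd (by simp [hint])
          simp only [bLoop, aLoop2, hg, hd, hnm, if_false, ht, hint,
            Option.isNone_none, Bool.and_false]
          exact ih (fun c hc => H c (by simp [hc])) Hdrest

-- ===== VERDICT (by name: the statement is the Claim_ definition above) =====
theorem infer_id_col_py_spec : Claim_equal_infer_id_col_py := by
  intro columns _hdom hpre
  obtain ⟨H1, H2⟩ := hpre
  unfold Spec_infer_id_col_py infer_id_col_py infer_id_col_py_alt
  cases h : aLoop1 columns with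
  | some n => exact (pvL1 columns none n h).symm
  | none =>
    have H0 := pvL0 columns h H1
    have Hd := H2 (fun col hc => (H0 col hc).2)
    exact (pvL2b columns H0 Hd).symm
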